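-- pv_equiv track=rewrite | github.com/ericz23/JournalLM-v1 | backend/app/services/journal_parser.py | _strip_outer_fence
-- ===== SOURCE A (Python) =====
-- def _strip_outer_fence(text: str) -> str:
--     """Remove the outermost ```markdown ... ``` wrapper if present."""
--     lines = text.split("\n")
--
--     start = 0
--     for i, line in enumerate(lines):
--         if line.strip().startswith("```markdown"):
--             start = i + 1
--             break
--
--     end = len(lines)
--     for i in range(len(lines) - 1, start - 1, -1):
--         if lines[i].strip() == "```":
--             end = i
--             break
--
--     return "\n".join(lines[start:end])
-- ===== SOURCE B (Python) =====
-- def _strip_outer_fence(text: str) -> str: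
--     """Remove the outermost ```markdown ... ``` wrapper if present (single pass)."""
--     lines = text.split("\n")
--
--     start = 0
--     opened = False
--     last_close = None
--     for i, line in enumerate(lines):
--         s = line.strip()
--         if not opened and s.startswith("```markdown"):
--             start = i + 1
--             opened = True
--             last_close = None
--         elif s == "```":
--             last_close = i
--
--     end = last_close if last_close is not None else len(lines)
--     return "\n".join(lines[start:end])
-- ===== Notes on version B (the rewrite author's own statement) =====
-- stated objective: alternative
-- what changed: Replaces A's two scans (a forward scan for the opening fence, then a backward index scan for the closing fence) with a single forward pass maintaining start, an opened flag and the latest closing-fence index.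
import Mathlib
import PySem

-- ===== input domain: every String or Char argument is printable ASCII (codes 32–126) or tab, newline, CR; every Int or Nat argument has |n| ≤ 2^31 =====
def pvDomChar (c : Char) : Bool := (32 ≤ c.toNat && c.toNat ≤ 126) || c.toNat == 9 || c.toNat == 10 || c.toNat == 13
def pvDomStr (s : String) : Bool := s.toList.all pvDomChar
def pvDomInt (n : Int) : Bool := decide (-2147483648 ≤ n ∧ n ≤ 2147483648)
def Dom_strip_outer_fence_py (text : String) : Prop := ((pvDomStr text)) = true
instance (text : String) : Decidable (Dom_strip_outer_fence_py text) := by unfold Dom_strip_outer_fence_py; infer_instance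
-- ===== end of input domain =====

-- B merges A's two scans (forward for the opening fence, backward for the closing fence)
-- into one forward pass keeping start / opened / latest-closing-index; same O(n) cost (objective: alternative).

-- ===== PORT A =====
-- `line.strip().startswith("```markdown")` — the opening-fence test
def pvOpenTest (line : String) : Bool :=
  PySem.Str.startswith (PySem.Str.strip line) "```markdown"

-- `lines[i].strip() == "```"` — the closing-fence test
def pvCloseTest (line : String) : Bool :=
  PySem.Str.strip line == "```"

-- A's first loop: 'for i, line in enumerate(lines): if …: start = i + 1; break' (start = 0 if no break)
def pvFindStartA : List (Int × String) → Int
  | [] => 0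
  | (i, line) :: rest => if pvOpenTest line then i + 1 else pvFindStartA rest

-- A's second loop: 'for i in range(len(lines)-1, start-1, -1): if …: end = i; break' (end = dflt if no break)
def pvFindEndA (lines : List String) (dflt : Int) : List Int → Int
  | [] => dflt
  | i :: rest =>
    if pvCloseTest (PySem.List.pyGetD lines i "") then i else pvFindEndA lines dflt rest

def strip_outer_fence_py (text : String) : String :=
  let lines := (PySem.Str.split? text "\n").getD []
  let start := pvFindStartA (PySem.List.enumerate lines 0)
  let e := pvFindEndA lines (lines.length : Int)
      (PySem.List.pyRange ((lines.length : Int) - 1) (start - 1) (-1))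
  PySem.Str.join "\n" (PySem.List.slice lines (some start) (some e))

-- ===== PORT B =====
-- B's single loop; state = (start, opened, last_close)
def pvLoopB : List (Int × String) → Int × Bool × Option Int → Int × Bool × Option Int
  | [], st => st
  | (i, line) :: rest, (start, opened, lastClose) =>
    let s := PySem.Str.strip line
    if !opened && PySem.Str.startswith s "```markdown" then
      pvLoopB rest (i + 1, true, none)
    else if s == "```" then
      pvLoopB rest (start, opened, some i)
    else
      pvLoopB rest (start, opened, lastClose)

def strip_outer_fence_py_alt (text : String) : String :=
  let lines := (PySem.Str.split? text "\n").getD []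
  let st := pvLoopB (PySem.List.enumerate lines 0) (0, false, none)
  let e := st.2.2.getD (lines.length : Int)
  PySem.Str.join "\n" (PySem.List.slice lines (some st.1) (some e))

-- ===== PRECONDITION & SPEC =====
def Spec_strip_outer_fence_py (text : String) (out : String) : Prop := out = strip_outer_fence_py_alt text
instance (text : String) (out : String) : Decidable (Spec_strip_outer_fence_py text out) := by unfold Spec_strip_outer_fence_py; infer_instance

-- ===== CLAIM (what is proved, stated in full; the proofs are below) =====
def Claim_equal_strip_outer_fence_py : Prop := ∀ (text : String), Dom_strip_outer_fence_py text → Spec_strip_outer_fence_py text (strip_outer_fence_py text)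

-- ===== LEMMAS AND PROOFS =====

-- index of the last closing-fence line (proof-only canonical form both ports reduce to)
def pvLastQ : List String → Int → Option Int → Option Int
  | [], _, c => c
  | x :: t, k, c => pvLastQ t (k + 1) (if pvCloseTest x then some k else c)

theorem pvLastQ_append_singleton (seg : List String) (x : String) (k : Int) (c : Option Int) :
    pvLastQ (seg ++ [x]) k c
      = if pvCloseTest x then some (k + seg.length) else pvLastQ seg k c := by
  induction seg generalizing k c with
  | nil => simp [pvLastQ]
  | cons y t ih =>
    simp only [List.cons_append, pvLastQ, ih, List.length_cons]
    split_ifs <;> · congr 1 <;> push_cast <;> ring_nf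

theorem pvFindStartA_none (l : List String) (k : Int)
    (h : ∀ x ∈ l, pvOpenTest x = false) :
    pvFindStartA (PySem.List.enumerate l k) = 0 := by
  induction l generalizing k with
  | nil => rfl
  | cons x t ih =>
    rw [PySem.List.enumerate_cons]
    simp only [pvFindStartA, h x (by simp)]
    exact ih _ (fun y hy => h y (by simp [hy]))

theorem pvFindStartA_found (pre : List String) (p : String) (suf : List String) (k : Int)
    (h : ∀ x ∈ pre, pvOpenTest x = false) (hp : pvOpenTest p = true) :
    pvFindStartA (PySem.List.enumerate (pre ++ p :: suf) k) = k + pre.length + 1 := by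
  induction pre generalizing k with
  | nil =>
    rw [List.nil_append, PySem.List.enumerate_cons]
    simp [pvFindStartA, hp]
  | cons x t ih =>
    rw [List.cons_append, PySem.List.enumerate_cons]
    simp only [pvFindStartA, h x (by simp)]
    rw [ih _ (fun y hy => h y (by simp [hy]))]
    simp only [List.length_cons]; push_cast; ring

theorem pvFindEndA_scan (lines : List String) (dflt : Int) (s : Nat) :
    ∀ (m : Nat), s ≤ m → m ≤ lines.length →
    pvFindEndA lines dflt (PySem.List.pyRange ((m : Int) - 1) ((s : Int) - 1) (-1))
      = (pvLastQ ((lines.drop s).take (m - s)) (s : Int) none).getD dflt := by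
  intro m hsm
  induction m, hsm using Nat.le_induction with
  | base =>
    intro _
    rw [PySem.List.pyRange_neg_one_eq_nil (by omega)]
    simp [pvFindEndA, pvLastQ]
  | succ m hsm ih =>
    intro hlen
    have hm : m < lines.length := by omega
    have hseg : (lines.drop s).take (m + 1 - s)
        = (lines.drop s).take (m - s) ++ [lines[m]] := by
      have : m + 1 - s = (m - s) + 1 := by omega
      rw [this, List.take_add_one, List.getElem?_drop]
      have : s + (m - s) = m := by omega
      rw [this, List.getElem?_eq_getElem hm]
      rfl
    have hlenseg : ((lines.drop s).take (m - s)).length = m - s := by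
      simp [List.length_take, List.length_drop]; omega
    rw [hseg, pvLastQ_append_singleton, hlenseg]
    have hcons : PySem.List.pyRange ((m : Int) + 1 - 1) ((s : Int) - 1) (-1)
        = (m : Int) :: PySem.List.pyRange ((m : Int) - 1) ((s : Int) - 1) (-1) := by
      have h1 : ((m : Int) + 1 - 1) = (m : Int) := by ring
      rw [h1, PySem.List.pyRange_neg_one_cons (by omega)]
    push_cast
    rw [hcons]
    simp only [pvFindEndA]
    rw [PySem.List.pyGetD_eq_getElem lines "" (by positivity) (by exact_mod_cast hm)]
    simp only [Int.toNat_natCast]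
    by_cases hq : pvCloseTest lines[m]
    · simp [hq]; omega
    · simp only [hq]
      rw [ih (by omega)]
      simp [hq]

theorem pvLoopB_append (xs ys : List (Int × String)) (st : Int × Bool × Option Int) :
    pvLoopB (xs ++ ys) st = pvLoopB ys (pvLoopB xs st) := by
  induction xs generalizing st with
  | nil => rfl
  | cons x t ih =>
    obtain ⟨i, line⟩ := x
    obtain ⟨a, b, c⟩ := st
    simp only [List.cons_append, pvLoopB]
    split_ifs <;> exact ih _

theorem pvLoopB_noP (pre : List String) (k : Int) (c : Option Int)
    (h : ∀ x ∈ pre, pvOpenTest x = false) :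
    pvLoopB (PySem.List.enumerate pre k) (0, false, c) = (0, false, pvLastQ pre k c) := by
  induction pre generalizing k c with
  | nil => rfl
  | cons x t ih =>
    rw [PySem.List.enumerate_cons]
    have hx : PySem.Str.startswith (PySem.Str.strip x) "```markdown" = false := h x (by simp)
    simp only [pvLoopB, hx, Bool.not_false, Bool.true_and, pvLastQ, pvCloseTest]
    by_cases hq : PySem.Str.strip x == "```" <;>
      simp only [hq, if_true] <;>
      exact ih _ _ (fun y hy => h y (by simp [hy]))

theorem pvLoopB_opened (suf : List String) (k : Int) (a : Int) (c : Option Int) :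
    pvLoopB (PySem.List.enumerate suf k) (a, true, c) = (a, true, pvLastQ suf k c) := by
  induction suf generalizing k c with
  | nil => rfl
  | cons x t ih =>
    rw [PySem.List.enumerate_cons]
    simp only [pvLoopB, Bool.not_true, Bool.false_and, pvLastQ, pvCloseTest]
    by_cases hq : PySem.Str.strip x == "```" <;>
      simp only [hq, if_true] <;> exact ih _ _

-- ===== VERDICT (by name: the statement is the Claim_ definition above) =====
theorem strip_outer_fence_py_spec : Claim_equal_strip_outer_fence_py := by
  intro text _
  unfold Spec_strip_outer_fence_py strip_outer_fence_py strip_outer_fence_py_alt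
  set lines := (PySem.Str.split? text "\n").getD [] with hlines
  cases hd : lines.dropWhile (fun l => !pvOpenTest l) with
  | nil =>
    have hall : ∀ x ∈ lines, pvOpenTest x = false := by
      intro x hx
      have := List.dropWhile_eq_nil_iff.mp hd x hx
      simpa using this
    have hA := pvFindStartA_none lines 0 hall
    have hB := pvLoopB_noP lines 0 none hall
    simp only [hA, hB]
    have hE := pvFindEndA_scan lines (lines.length : Int) 0 lines.length (by omega) (le_refl _)
    simp only [Nat.cast_zero, List.drop_zero, Nat.sub_zero, List.take_length] at hE
    rw [hE]
  | cons p suf =>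
    have hsplit : lines.takeWhile (fun l => !pvOpenTest l) ++ p :: suf = lines := by
      rw [← hd, List.takeWhile_append_dropWhile]
    set pre := lines.takeWhile (fun l => !pvOpenTest l) with hpre
    have hpreall : ∀ x ∈ pre, pvOpenTest x = false := by
      intro x hx
      have := List.mem_takeWhile_imp hx
      simpa using this
    have hp : pvOpenTest p = true := by
      have h := List.head?_dropWhile_not (fun l => !pvOpenTest l) lines
      rw [hd] at h
      simpa using h
    have hlen : lines.length = pre.length + 1 + suf.length := by
      rw [← hsplit]; simp; omega
    -- A's start
    have hA : pvFindStartA (PySem.List.enumerate lines 0) = (pre.length : Int) + 1 := by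
      rw [← hsplit, pvFindStartA_found pre p suf 0 hpreall hp]; ring
    -- B's state
    have hB : pvLoopB (PySem.List.enumerate lines 0) (0, false, none)
        = ((pre.length : Int) + 1, true, pvLastQ suf ((pre.length : Int) + 1) none) := by
      rw [← hsplit, PySem.List.enumerate_append, pvLoopB_append,
        pvLoopB_noP pre 0 none hpreall, PySem.List.enumerate_cons]
      have hcond : PySem.Str.startswith (PySem.Str.strip p) "```markdown" = true := by
        simpa [pvOpenTest] using hp
      simp only [pvLoopB, Bool.not_false, Bool.true_and, hcond, if_true]
      rw [pvLoopB_opened]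
      norm_num
    have hdrop : lines.drop (pre.length + 1) = suf := by
      rw [← hsplit]
      have : pre ++ p :: suf = (pre ++ [p]) ++ suf := by simp
      rw [this, List.drop_left' (by simp)]
    have hE := pvFindEndA_scan lines (lines.length : Int) (pre.length + 1) lines.length
      (by omega) (le_refl _)
    rw [hdrop] at hE
    have htake : suf.take (lines.length - (pre.length + 1)) = suf := by
      apply List.take_of_length_le; omega
    rw [htake] at hE
    simp only [hA, hB]
    rw [show ((pre.length + 1 : Nat) : Int) = (pre.length : Int) + 1 by push_cast; ring] at hE
    rw [hE]
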